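-- pv_equiv track=rewrite | github.com/vlzcrz/lexo_corpus | python/utils/paddle_ocr_handler.py | get_content_reconstruct
-- ===== SOURCE A (Python) =====
-- def get_content_reconstruct(txts):
--     content = ""
--     txt_reconstructed = ""
--     on_reconstruction = False
--     for txt in txts:
--         if on_reconstruction:
--             if txt[-1] == '-':
--                 txt_reconstructed += txt[:-1]
--                 continue
--             else:
--                 content += f"{txt_reconstructed}{txt} "
--                 txt_reconstructed = ""
--                 on_reconstruction = False
--                 continue
--
--         if txt[-1] == '-':
--             txt_reconstructed += txt[:-1]
--             on_reconstruction = True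
--             continue
--
--         content += f"{txt} "
--
--     return content
-- ===== SOURCE B (Python) =====
-- def get_content_reconstruct(txts):
--     parts = []
--     i = 0
--     n = len(txts)
--     while i < n:
--         txt = txts[i]
--         if txt[-1] == '-':
--             pieces = [txt[:-1]]
--             i += 1
--             while i < n and txts[i][-1] == '-':
--                 pieces.append(txts[i][:-1])
--                 i += 1
--             if i < n:
--                 parts.append(''.join(pieces) + txts[i] + ' ')
--                 i += 1
--             # else: unfinished hyphen run at the end is dropped, as in the original
--         else:
--             parts.append(txt + ' ')
--             i += 1
--     return ''.join(parts)
-- ===== Notes on version B (the rewrite author's own statement) =====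
-- stated objective: alternative
-- what changed: Replaces the on_reconstruction state flag threaded through a single for-loop with an explicit index, a nested inner while-loop that consumes a whole hyphen-ended run at once, and ''.join over collected parts instead of repeated string concatenation.
import Mathlib
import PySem

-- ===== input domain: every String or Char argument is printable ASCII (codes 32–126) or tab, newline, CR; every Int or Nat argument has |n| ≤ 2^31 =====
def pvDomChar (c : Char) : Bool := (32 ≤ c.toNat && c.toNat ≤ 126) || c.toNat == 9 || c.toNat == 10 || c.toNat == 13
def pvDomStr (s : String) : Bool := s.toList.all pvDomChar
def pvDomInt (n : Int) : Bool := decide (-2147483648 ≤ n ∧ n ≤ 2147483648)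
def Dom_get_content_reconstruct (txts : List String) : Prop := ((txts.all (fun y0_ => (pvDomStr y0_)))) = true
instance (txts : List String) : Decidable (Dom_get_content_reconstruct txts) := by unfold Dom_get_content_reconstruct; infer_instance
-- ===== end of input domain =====

-- B replaces A's on_reconstruction flag with an explicit index loop and a nested inner
-- loop consuming each hyphen-ended run at once (objective: alternative decomposition).
-- Both programs raise IndexError on an empty fragment; Pre_ excludes those inputs.

-- ===== PORT A =====
-- txt[-1] == '-' on a nonempty fragment; on the empty fragment Python raises
-- (excluded by Pre_), the port returns false there.
def pvLastHyphen (s : String) : Bool := s.toList.getLast? == some '-'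
-- txt[:-1] as a character list
def pvInit (s : String) : List Char := s.toList.dropLast

-- literal fold over the state (content, txt_reconstructed, on_reconstruction)
def get_content_reconstruct (txts : List String) : String :=
  let st := txts.foldl (fun (st : List Char × List Char × Bool) txt =>
    let (content, txt_reconstructed, on_reconstruction) := st
    if on_reconstruction then
      if pvLastHyphen txt then (content, txt_reconstructed ++ pvInit txt, true)
      else (content ++ txt_reconstructed ++ txt.toList ++ [' '], [], false)
    else if pvLastHyphen txt then (content, txt_reconstructed ++ pvInit txt, true)
    else (content ++ txt.toList ++ [' '], txt_reconstructed, on_reconstruction))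
    ([], [], false)
  String.mk st.1

-- ===== PORT B =====
-- B's outer index loop / inner run-consuming loop, as mutual structural recursion
-- on the remaining fragments (the index i of Source B is the position in the list);
-- the `parts` list Source B joins with ''.join is a List of char-lists, flattened at the end,
-- and the inner `pieces` list likewise.
mutual
  def pvAltGo : List String → List (List Char)
    | [] => []
    | t :: rest =>
      if pvLastHyphen t then pvAltInner [pvInit t] rest
      else (t.toList ++ [' ']) :: pvAltGo rest
  def pvAltInner (pieces : List (List Char)) : List String → List (List Char)
    | [] => []  -- unfinished hyphen run at the end is dropped
    | t :: rest =>
      if pvLastHyphen t then pvAltInner (pieces ++ [pvInit t]) rest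
      else (pieces.flatten ++ t.toList ++ [' ']) :: pvAltGo rest
end

def get_content_reconstruct_alt (txts : List String) : String :=
  String.mk (pvAltGo txts).flatten

-- ===== PRECONDITION & SPEC =====
-- Pre_ excludes exactly the inputs containing an empty fragment, on which both
-- Pythons raise IndexError (txt[-1]).
def Pre_get_content_reconstruct (txts : List String) : Prop := ∀ s ∈ txts, s ≠ ""
instance (txts : List String) : Decidable (Pre_get_content_reconstruct txts) := by
  unfold Pre_get_content_reconstruct; infer_instance
def pvWitness_get_content_reconstruct : List String := ["ab-", "cd-", "ef", "g"]

def Spec_get_content_reconstruct (txts : List String) (out : String) : Prop := out = get_content_reconstruct_alt txts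
instance (txts : List String) (out : String) : Decidable (Spec_get_content_reconstruct txts out) := by unfold Spec_get_content_reconstruct; infer_instance

-- ===== CLAIM (what is proved, stated in full; the proofs are below) =====
def Claim_equal_get_content_reconstruct : Prop := ∀ (txts : List String), Dom_get_content_reconstruct txts → Pre_get_content_reconstruct txts → Spec_get_content_reconstruct txts (get_content_reconstruct txts)

-- ===== LEMMAS AND PROOFS =====

-- the loop body of port A, named for the invariant lemma
def pvAStep (st : List Char × List Char × Bool) (txt : String) : List Char × List Char × Bool :=
  let (content, txt_reconstructed, on_reconstruction) := st
  if on_reconstruction then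
    if pvLastHyphen txt then (content, txt_reconstructed ++ pvInit txt, true)
    else (content ++ txt_reconstructed ++ txt.toList ++ [' '], [], false)
  else if pvLastHyphen txt then (content, txt_reconstructed ++ pvInit txt, true)
  else (content ++ txt.toList ++ [' '], txt_reconstructed, on_reconstruction)

theorem pvFold_inv (l : List String) :
    (∀ c, (l.foldl pvAStep (c, [], false)).1 = c ++ (pvAltGo l).flatten) ∧
    (∀ c ps, (l.foldl pvAStep (c, ps.flatten, true)).1 = c ++ (pvAltInner ps l).flatten) := by
  induction l with
  | nil => simp [pvAltGo, pvAltInner]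
  | cons t rest ih =>
    constructor
    · intro c
      by_cases h : pvLastHyphen t = true
      · have := ih.2 c [pvInit t]
        simpa [List.foldl, pvAStep, h, pvAltGo] using this
      · simp [List.foldl, pvAStep, h, pvAltGo, ih.1]
    · intro c ps
      by_cases h : pvLastHyphen t = true
      · have := ih.2 c (ps ++ [pvInit t])
        simpa [List.foldl, pvAStep, h, pvAltInner] using this
      · simp [List.foldl, pvAStep, h, pvAltInner, ih.1]

-- ===== VERDICT (by name: the statement is the Claim_ definition above) =====
theorem get_content_reconstruct_spec : Claim_equal_get_content_reconstruct := by
  intro txts _ _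
  show get_content_reconstruct txts = get_content_reconstruct_alt txts
  have h := (pvFold_inv txts).1 []
  simp only [get_content_reconstruct, get_content_reconstruct_alt]
  have hfold : txts.foldl (fun (st : List Char × List Char × Bool) txt =>
      let (content, txt_reconstructed, on_reconstruction) := st
      if on_reconstruction then
        if pvLastHyphen txt then (content, txt_reconstructed ++ pvInit txt, true)
        else (content ++ txt_reconstructed ++ txt.toList ++ [' '], [], false)
      else if pvLastHyphen txt then (content, txt_reconstructed ++ pvInit txt, true)
      else (content ++ txt.toList ++ [' '], txt_reconstructed, on_reconstruction))
      ([], [], false) = txts.foldl pvAStep ([], [], false) := rfl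
  rw [hfold, h]; simp
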